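-- pv_equiv track=rewrite | github.com/jiaran-king/MicroLM | microlm/training/sft.py | build_loss_labels
-- ===== SOURCE A (Python) =====
-- def _find_subsequence(sequence: list[int], pattern: list[int], start: int = 0) -> int:
--     if not pattern:
--         return start
--     limit = len(sequence) - len(pattern) + 1
--     for index in range(start, max(limit, start)):
--         if sequence[index : index + len(pattern)] == pattern:
--             return index
--     return -1
--
-- def build_loss_labels(
--     input_ids: list[int],
--     tokenizer,
--     max_length: int,
--     assistant_header_ids: list[int],
--     eos_boundary_ids: list[int],
--     pad_token_id: int,
-- ) -> list[int]:
--     labels = [-100] * len(input_ids)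
--     index = 0
--     while index < len(input_ids):
--         header_index = _find_subsequence(input_ids, assistant_header_ids, start=index)
--         if header_index < 0:
--             break
--         start = header_index + len(assistant_header_ids)
--         end = _find_subsequence(input_ids, eos_boundary_ids, start=start)
--         if end < 0:
--             end = len(input_ids)
--             boundary = end
--         else:
--             boundary = min(end + len(eos_boundary_ids), max_length)
--         for position in range(start, min(boundary, len(input_ids))):
--             if input_ids[position] != pad_token_id:
--                 labels[position] = input_ids[position]
--         index = boundary if end >= 0 else len(input_ids)
--     return labels
-- ===== SOURCE B (Python) =====
-- def _match_positions(seq, pat):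
--     """All positions where pat occurs in seq, collected in one left-to-right pass."""
--     m = len(pat)
--     return [i for i in range(len(seq) - m + 1)
--             if all(seq[i + k] == pat[k] for k in range(m))]
--
--
-- def build_loss_labels(input_ids, tokenizer, max_length,
--                       assistant_header_ids, eos_boundary_ids, pad_token_id):
--     n = len(input_ids)
--     labels = [-100] * n
--     headers = _match_positions(input_ids, assistant_header_ids)
--     eoses = _match_positions(input_ids, eos_boundary_ids)
--     hp = 0
--     ep = 0
--     index = 0
--     while index < n:
--         if assistant_header_ids:
--             while hp < len(headers) and headers[hp] < index:
--                 hp += 1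
--             if hp == len(headers):
--                 break
--             h = headers[hp]
--         else:
--             h = index
--         start = h + len(assistant_header_ids)
--         if eos_boundary_ids:
--             while ep < len(eoses) and eoses[ep] < start:
--                 ep += 1
--             e = eoses[ep] if ep < len(eoses) else -1
--         else:
--             e = start
--         if e < 0:
--             boundary = n
--         else:
--             boundary = min(e + len(eos_boundary_ids), max_length)
--         for position in range(start, min(boundary, n)):
--             if input_ids[position] != pad_token_id:
--                 labels[position] = input_ids[position]
--         index = boundary if e >= 0 else n
--     return labels
-- ===== Notes on version B (the rewrite author's own statement) =====
-- stated objective: alternative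
-- what changed: A re-scans the token list with a slice-comparing _find_subsequence on every loop iteration; B computes the occurrence-position lists of both marker patterns once and then walks them with forward-only pointers, so no subsequence search is ever repeated.
-- outside the precondition, e.g. on build_loss_labels([2], 0, -1, [], [2], 0): A returns [-100], B does not finish within the time limit
import Mathlib
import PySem

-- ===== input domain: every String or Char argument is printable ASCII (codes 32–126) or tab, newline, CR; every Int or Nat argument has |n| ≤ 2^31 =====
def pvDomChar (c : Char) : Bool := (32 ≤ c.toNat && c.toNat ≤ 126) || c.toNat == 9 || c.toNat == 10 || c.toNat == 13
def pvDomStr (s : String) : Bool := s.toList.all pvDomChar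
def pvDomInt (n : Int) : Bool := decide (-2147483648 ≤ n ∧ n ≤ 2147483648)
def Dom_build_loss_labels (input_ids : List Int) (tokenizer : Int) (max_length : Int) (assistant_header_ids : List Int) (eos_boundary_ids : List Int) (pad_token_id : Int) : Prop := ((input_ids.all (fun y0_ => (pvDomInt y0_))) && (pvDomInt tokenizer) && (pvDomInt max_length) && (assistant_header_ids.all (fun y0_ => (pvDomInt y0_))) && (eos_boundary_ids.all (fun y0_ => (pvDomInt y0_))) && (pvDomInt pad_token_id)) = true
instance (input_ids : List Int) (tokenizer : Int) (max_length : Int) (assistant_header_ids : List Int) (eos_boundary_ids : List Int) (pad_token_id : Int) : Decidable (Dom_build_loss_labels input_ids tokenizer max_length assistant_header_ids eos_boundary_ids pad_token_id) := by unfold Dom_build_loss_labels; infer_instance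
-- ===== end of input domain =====

-- ===== PORT A =====
-- B replaces A's repeated slice-comparing _find_subsequence scans by occurrence lists of
-- both marker patterns computed once and then consumed by forward-only pointers (same
-- return value; objective: alternative). A mutates only its local `labels`, so the
-- return value is the whole observable effect.
-- _find_subsequence: the for-loop with early return is ported as find? over the range.
def pvFindSub (seq pat : List Int) (start : Int) : Int :=
  if pat = [] then start
  else
    let limit : Int := (seq.length : Int) - (pat.length : Int) + 1
    match (PySem.List.pyRange start (max limit start) 1).find?
        (fun index => PySem.List.slice seq (some index) (some (index + (pat.length : Int))) == pat) with
    | some index => index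
    | none => -1

-- A's while-loop. Fuel: under Pre_ the index strictly increases and stays ≤ len, so
-- len+1 iterations always suffice; outside Pre_ the Python loop can run forever.
-- labels[position] = input_ids[position]: position is provably in range, so pyGetD/pySetD are exact.
def pvALoop (ids H E : List Int) (ml pad : Int) : Nat → Int → List Int → List Int
  | 0, _, labels => labels
  | fuel+1, index, labels =>
    if index < (ids.length : Int) then
      let h := pvFindSub ids H index
      if h < 0 then labels
      else
        let start := h + (H.length : Int)
        let e := pvFindSub ids E start
        let endv : Int := if e < 0 then (ids.length : Int) else e
        let boundary : Int := if e < 0 then (ids.length : Int) else min (e + (E.length : Int)) ml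
        let labels' := (PySem.List.pyRange start (min boundary (ids.length : Int)) 1).foldl
          (fun lab pos => if PySem.List.pyGetD ids pos 0 ≠ pad then PySem.List.pySetD lab pos (PySem.List.pyGetD ids pos 0) else lab)
          labels
        let index' : Int := if endv ≥ 0 then boundary else (ids.length : Int)
        pvALoop ids H E ml pad fuel index' labels'
    else labels

def build_loss_labels (input_ids : List Int) (tokenizer : Int) (max_length : Int) (assistant_header_ids : List Int) (eos_boundary_ids : List Int) (pad_token_id : Int) : List Int :=
  pvALoop input_ids assistant_header_ids eos_boundary_ids max_length pad_token_id
    (input_ids.length + 1) 0 (List.replicate input_ids.length (-100))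

-- ===== PORT B =====
-- _match_positions(seq, pat): the comprehension over range(n-m+1) with its all(...) test.
def pvOcc (seq pat : List Int) : List Int :=
  (PySem.List.pyRange 0 ((seq.length : Int) - (pat.length : Int) + 1) 1).filter
    (fun i => (PySem.List.pyRange 0 (pat.length : Int) 1).all
       (fun k => PySem.List.pyGetD seq (i + k) 0 == PySem.List.pyGetD pat k 0))

-- the two inner `while p < len(L) and L[p] < s: p += 1` pointer advances
def pvAdv (L : List Int) (s : Int) (p : Nat) : Nat :=
  if p < L.length then
    if L.getD p 0 < s then pvAdv L s (p+1) else p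
  else p
termination_by L.length - p

-- B's while-loop over (index, hp, ep). Fuel: under Pre_ the index strictly increases and
-- stays ≤ len, so len+1 iterations suffice; outside Pre_ the Python loop can run forever.
def pvBMain (ids H E : List Int) (ml pad : Int) (headers eoses : List Int) :
    Nat → Int → Nat → Nat → List Int → List Int
  | 0, _, _, _, labels => labels
  | fuel+1, index, hp, ep, labels =>
    if index < (ids.length : Int) then
      let hres : Option (Int × Nat) :=
        if H = [] then some (index, hp)
        else
          let hp' := pvAdv headers index hp
          if hp' = headers.length then none else some (headers.getD hp' 0, hp')
      match hres with
      | none => labels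
      | some (h, hp') =>
        let start := h + (H.length : Int)
        let eres : Int × Nat :=
          if E = [] then (start, ep)
          else
            let q := pvAdv eoses start ep
            if q = eoses.length then (-1, q) else (eoses.getD q 0, q)
        let e := eres.1
        let ep' := eres.2
        let boundary : Int := if e < 0 then (ids.length : Int) else min (e + (E.length : Int)) ml
        let labels' := (PySem.List.pyRange start (min boundary (ids.length : Int)) 1).foldl
          (fun lab pos => if PySem.List.pyGetD ids pos 0 ≠ pad then PySem.List.pySetD lab pos (PySem.List.pyGetD ids pos 0) else lab)
          labels
        pvBMain ids H E ml pad headers eoses fuel (if e ≥ 0 then boundary else (ids.length : Int)) hp' ep' labels'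
    else labels

def build_loss_labels_alt (input_ids : List Int) (tokenizer : Int) (max_length : Int) (assistant_header_ids : List Int) (eos_boundary_ids : List Int) (pad_token_id : Int) : List Int :=
  pvBMain input_ids assistant_header_ids eos_boundary_ids max_length pad_token_id
    (pvOcc input_ids assistant_header_ids) (pvOcc input_ids eos_boundary_ids)
    (input_ids.length + 1) 0 0 0 (List.replicate input_ids.length (-100))

-- ===== PRECONDITION & SPEC =====
-- pattern occurrence test used by Pre_ (checks `ids[j:j+len(pat)] == pat` declaratively)
def pvMatch (ids pat : List Int) (j : Nat) : Bool := (ids.drop j).take pat.length == pat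

-- Pre_ excludes exactly the inputs on which A never returns — both marker patterns empty
-- with a non-empty input, or (with 0 ≤ max_length) a header occurrence at position
-- ≥ max_length followed by a later eos occurrence, where A re-finds the same span forever
-- — plus, as outside the natural domain of a length cap, negative max_length inputs on
-- which both markers occur (there A's index goes negative and its value, when the loop
-- does exit, is an accident of negative-slice wraparound).
def Pre_build_loss_labels (input_ids : List Int) (tokenizer : Int) (max_length : Int) (assistant_header_ids : List Int) (eos_boundary_ids : List Int) (pad_token_id : Int) : Prop :=
  input_ids = [] ∨
  (assistant_header_ids ≠ [] ∧ ∀ j ∈ List.range (input_ids.length + 1), pvMatch input_ids assistant_header_ids j = false) ∨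
  (assistant_header_ids ≠ [] ∧ eos_boundary_ids ≠ [] ∧ ∀ j ∈ List.range (input_ids.length + 1), pvMatch input_ids eos_boundary_ids j = false) ∨
  (0 ≤ max_length ∧ (assistant_header_ids ≠ [] ∨ eos_boundary_ids ≠ []) ∧
    ∀ h ∈ List.range (input_ids.length + 1), max_length ≤ (h : Int) → pvMatch input_ids assistant_header_ids h = true →
      ∀ e ∈ List.range (input_ids.length + 1), h + assistant_header_ids.length ≤ e → pvMatch input_ids eos_boundary_ids e = true → False)
instance (input_ids : List Int) (tokenizer : Int) (max_length : Int) (assistant_header_ids : List Int) (eos_boundary_ids : List Int) (pad_token_id : Int) : Decidable (Pre_build_loss_labels input_ids tokenizer max_length assistant_header_ids eos_boundary_ids pad_token_id) := by unfold Pre_build_loss_labels; infer_instance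
def pvWitness_build_loss_labels : List Int × Int × Int × List Int × List Int × Int :=
  ([5, 1, 2, 7, 7, 3, 4, 9], 0, 8, [1, 2], [3, 4], 9)
def Spec_build_loss_labels (input_ids : List Int) (tokenizer : Int) (max_length : Int) (assistant_header_ids : List Int) (eos_boundary_ids : List Int) (pad_token_id : Int) (out : List Int) : Prop := out = build_loss_labels_alt input_ids tokenizer max_length assistant_header_ids eos_boundary_ids pad_token_id
instance (input_ids : List Int) (tokenizer : Int) (max_length : Int) (assistant_header_ids : List Int) (eos_boundary_ids : List Int) (pad_token_id : Int) (out : List Int) : Decidable (Spec_build_loss_labels input_ids tokenizer max_length assistant_header_ids eos_boundary_ids pad_token_id out) := by unfold Spec_build_loss_labels; infer_instance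

-- ===== CLAIM (what is proved, stated in full; the proofs are below) =====
def Claim_equal_build_loss_labels : Prop := ∀ (input_ids : List Int) (tokenizer : Int) (max_length : Int) (assistant_header_ids : List Int) (eos_boundary_ids : List Int) (pad_token_id : Int), Dom_build_loss_labels input_ids tokenizer max_length assistant_header_ids eos_boundary_ids pad_token_id → Pre_build_loss_labels input_ids tokenizer max_length assistant_header_ids eos_boundary_ids pad_token_id → Spec_build_loss_labels input_ids tokenizer max_length assistant_header_ids eos_boundary_ids pad_token_id (build_loss_labels input_ids tokenizer max_length assistant_header_ids eos_boundary_ids pad_token_id)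

-- ===== LEMMAS AND PROOFS =====

-- first match of pat in ids at position ≥ s (the value both search mechanisms compute)
def pvFirstM (ids pat : List Int) (s : Nat) : Option Nat :=
  if ids.length ≤ s then none
  else if pvMatch ids pat s then some s else pvFirstM ids pat (s+1)
termination_by ids.length - s

def pvF (ids : List Int) (pad : Int) : List Int → Int → List Int :=
  fun lab pos => if PySem.List.pyGetD ids pos 0 ≠ pad then PySem.List.pySetD lab pos (PySem.List.pyGetD ids pos 0) else lab

lemma pvSlice_eq_match (ids pat : List Int) (j : Nat) :
    (PySem.List.slice ids (some (j:Int)) (some ((j:Int) + (pat.length : Int))) == pat) = pvMatch ids pat j := by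
  rw [PySem.List.slice_natCast_add]; rfl

lemma pvAllPred_eq (ids pat : List Int) (j : Nat) (hb : j + pat.length ≤ ids.length) :
    ((PySem.List.pyRange 0 (pat.length : Int) 1).all
       (fun k => PySem.List.pyGetD ids ((j:Int) + k) 0 == PySem.List.pyGetD pat k 0)) = pvMatch ids pat j := by
  rw [Bool.eq_iff_iff, List.all_eq_true, pvMatch, beq_iff_eq]
  constructor
  · intro hall
    apply List.ext_getElem
    · simp; omega
    · intro k hk1 hk2
      have hkp : k < pat.length := by simpa using hk2
      have := hall ((k:Int)) (by rw [PySem.List.mem_pyRange_one]; constructor <;> [positivity; exact_mod_cast hkp])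
      rw [show (j:Int) + (k:Int) = ((j+k : Nat):Int) from by push_cast; ring] at this
      rw [PySem.List.pyGetD_natCast, PySem.List.pyGetD_natCast, beq_iff_eq] at this
      simp only [List.getElem_take, List.getElem_drop]
      rw [List.getD_eq_getElem _ _ (by omega), List.getD_eq_getElem _ _ hkp] at this
      exact this
  · intro heq x hx
    rw [PySem.List.mem_pyRange_one] at hx
    obtain ⟨k, rfl⟩ : ∃ k : Nat, x = (k:Int) := ⟨x.toNat, by omega⟩
    have hkp : k < pat.length := by exact_mod_cast hx.2
    rw [show (j:Int) + (k:Int) = ((j+k : Nat):Int) from by push_cast; ring,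
        PySem.List.pyGetD_natCast, PySem.List.pyGetD_natCast, beq_iff_eq,
        List.getD_eq_getElem _ _ (by omega), List.getD_eq_getElem _ _ hkp]
    have h1 := List.getElem_of_eq heq (show k < ((ids.drop j).take pat.length).length from by
      rw [List.length_take, List.length_drop]; omega)
    simp only [List.getElem_take, List.getElem_drop] at h1
    exact h1

lemma pvMatch_empty (ids : List Int) (j : Nat) : pvMatch ids [] j = true := by
  simp [pvMatch]

lemma pvMatch_bound {ids pat : List Int} {j : Nat} (h : pvMatch ids pat j = true) (hp : pat ≠ []) :
    j + pat.length ≤ ids.length := by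
  rw [pvMatch, beq_iff_eq] at h
  have hL : pat.length ≠ 0 := fun hh => hp (List.length_eq_zero_iff.mp hh)
  have := congrArg List.length h
  rw [List.length_take, List.length_drop] at this
  omega

lemma pvFirstM_some {ids pat : List Int} {s h : Nat} (hs : pvFirstM ids pat s = some h) :
    s ≤ h ∧ h < ids.length ∧ pvMatch ids pat h = true ∧ ∀ j, s ≤ j → j < h → pvMatch ids pat j = false := by
  fun_induction pvFirstM ids pat s with
  | case1 s hlen => simp at hs
  | case2 s hlen hm =>
    obtain rfl : s = h := by simpa using hs
    exact ⟨le_refl _, by omega, hm, fun j h1 h2 => by omega⟩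
  | case3 s hlen hm ih =>
    obtain ⟨h1, h2, h3, h4⟩ := ih hs
    refine ⟨by omega, h2, h3, fun j hj1 hj2 => ?_⟩
    rcases Nat.eq_or_lt_of_le hj1 with rfl | hlt
    · simpa using hm
    · exact h4 j hlt hj2

lemma pvFirstM_none {ids pat : List Int} {s : Nat} (hs : pvFirstM ids pat s = none) (hp : pat ≠ []) :
    ∀ j, s ≤ j → pvMatch ids pat j = false := by
  intro j hj
  by_contra hc
  have hm : pvMatch ids pat j = true := by simpa using hc
  have hb := pvMatch_bound hm hp
  have hL : 0 < pat.length := List.length_pos_of_ne_nil hp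
  clear hc
  induction hj2 : ids.length - s generalizing s with
  | zero =>
    rw [pvFirstM] at hs
    rw [if_pos (by omega : ids.length ≤ s)] at hs
    omega
  | succ k ih =>
    rw [pvFirstM] at hs
    by_cases hls : ids.length ≤ s
    · omega
    · rw [if_neg hls] at hs
      rcases Nat.eq_or_lt_of_le hj with rfl | hlt
      · rw [if_pos hm] at hs; simp at hs
      · by_cases hms : pvMatch ids pat s
        · rw [if_pos hms] at hs; simp at hs
        · rw [if_neg hms] at hs
          exact ih hs (by omega) (by omega)

lemma pvFirstM_eq_none {ids pat : List Int} {s : Nat}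
    (hno : ∀ j, s ≤ j → pvMatch ids pat j = false) : pvFirstM ids pat s = none := by
  fun_induction pvFirstM ids pat s with
  | case1 s hlen => rfl
  | case2 s hlen hm => rw [hno s (le_refl _)] at hm; simp at hm
  | case3 s hlen hm ih => exact ih (fun j hj => hno j (by omega))

lemma pvFirstM_eq_some {ids pat : List Int} {s h : Nat} (hp : pat ≠ [])
    (hm : pvMatch ids pat h = true) (hsh : s ≤ h)
    (hmin : ∀ j, s ≤ j → j < h → pvMatch ids pat j = false) :
    pvFirstM ids pat s = some h := by
  cases hfm : pvFirstM ids pat s with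
  | none => rw [pvFirstM_none hfm hp h hsh] at hm; simp at hm
  | some h' =>
    obtain ⟨h1, h2, h3, h4⟩ := pvFirstM_some hfm
    congr 1
    by_contra hne
    rcases Nat.lt_or_ge h' h with hlt | hge
    · rw [hmin h' h1 hlt] at h3; simp at h3
    · rw [h4 h hsh (by omega)] at hm; simp at hm

lemma pvRange_empty (a b : Int) (h : b ≤ a) : PySem.List.pyRange a b 1 = [] := by
  simp [PySem.List.pyRange_one]; omega

lemma pvFindSub_nil (ids : List Int) (st : Int) : pvFindSub ids [] st = st := by
  simp [pvFindSub]

lemma pvFindSub_eq (ids pat : List Int) (hp : pat ≠ []) (s : Nat) :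
    pvFindSub ids pat (s:Int) =
      (match pvFirstM ids pat s with | some h => (h:Int) | none => -1) := by
  have hL : 0 < pat.length := List.length_pos_of_ne_nil hp
  induction hk : ids.length - s generalizing s with
  | zero =>
    have hls : ids.length ≤ s := by omega
    simp only [pvFindSub]; rw [if_neg hp]
    have hmax : max ((ids.length : Int) - (pat.length : Int) + 1) (s:Int) = (s:Int) := by
      rw [max_eq_right]; omega
    rw [hmax, pvRange_empty _ _ (le_refl _)]
    have : pvFirstM ids pat s = none := by rw [pvFirstM, if_pos hls]
    rw [this]; rfl
  | succ k ih =>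
    by_cases hls : ids.length ≤ s
    · simp only [pvFindSub]; rw [if_neg hp]
      have hmax : max ((ids.length : Int) - (pat.length : Int) + 1) (s:Int) = (s:Int) := by
        rw [max_eq_right]; omega
      rw [hmax, pvRange_empty _ _ (le_refl _)]
      have : pvFirstM ids pat s = none := by rw [pvFirstM, if_pos hls]
      rw [this]; rfl
    · by_cases hlim : s + pat.length ≤ ids.length
      · simp only [pvFindSub]; rw [if_neg hp]
        have hcons : PySem.List.pyRange (s:Int) (max ((ids.length : Int) - (pat.length : Int) + 1) (s:Int)) 1
            = (s:Int) :: PySem.List.pyRange ((s:Int)+1) (max ((ids.length : Int) - (pat.length : Int) + 1) (s:Int)) 1 := by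
          apply PySem.List.pyRange_one_cons
          rw [max_eq_left (by omega)]
          omega
        rw [hcons, List.find?_cons]
        rw [pvSlice_eq_match]
        by_cases hm : pvMatch ids pat s
        · rw [hm]
          have : pvFirstM ids pat s = some s := by rw [pvFirstM, if_neg hls, if_pos hm]
          rw [this]
        · rw [Bool.not_eq_true] at hm
          rw [hm]
          have hstep : pvFirstM ids pat s = pvFirstM ids pat (s+1) := by
            rw [pvFirstM, if_neg hls, if_neg (by simp [hm])]
          rw [hstep]
          have hcast : ((s:Int)+1) = ((s+1 : Nat) : Int) := by push_cast; ring
          have hmax2 : max ((ids.length : Int) - (pat.length : Int) + 1) (s:Int)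
              = max ((ids.length : Int) - (pat.length : Int) + 1) ((s+1 : Nat):Int) := by
            rw [max_eq_left (by omega), max_eq_left (by omega)]
          rw [hmax2, hcast]
          have := ih (s+1) (by omega)
          simp only [pvFindSub] at this; rw [if_neg hp] at this
          exact this
      · simp only [pvFindSub]; rw [if_neg hp]
        have hmax : max ((ids.length : Int) - (pat.length : Int) + 1) (s:Int) = (s:Int) := by
          rw [max_eq_right]; omega
        rw [hmax, pvRange_empty _ _ (le_refl _)]
        have hno : ∀ j, s ≤ j → pvMatch ids pat j = false := by
          intro j hj
          by_contra hc
          have hm : pvMatch ids pat j = true := by simpa using hc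
          have := pvMatch_bound hm hp
          omega
        rw [pvFirstM_eq_none hno]; rfl

-- ---- B-side: occurrence lists ----

lemma pvOcc_sorted (seq pat : List Int) : (pvOcc seq pat).Pairwise (· < ·) :=
  (PySem.List.pairwise_lt_pyRange_one _ _).filter _

lemma pvOcc_mem {seq pat : List Int} (hp : pat ≠ []) (x : Int) :
    x ∈ pvOcc seq pat ↔ ∃ j : Nat, x = (j:Int) ∧ pvMatch seq pat j = true := by
  have hL : 0 < pat.length := List.length_pos_of_ne_nil hp
  rw [pvOcc, List.mem_filter, PySem.List.mem_pyRange_one]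
  constructor
  · rintro ⟨⟨hx0, hx1⟩, hall⟩
    obtain ⟨j, rfl⟩ : ∃ j : Nat, x = (j:Int) := ⟨x.toNat, by omega⟩
    have hb : j + pat.length ≤ seq.length := by
      have : (j:Int) < (seq.length : Int) - (pat.length : Int) + 1 := hx1
      omega
    exact ⟨j, rfl, by rw [← pvAllPred_eq seq pat j hb]; exact hall⟩
  · rintro ⟨j, rfl, hm⟩
    have hb := pvMatch_bound hm hp
    refine ⟨⟨by positivity, by omega⟩, ?_⟩
    rw [pvAllPred_eq seq pat j hb]; exact hm

lemma pvOcc_nil {seq pat : List Int} (hp : pat ≠ [])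
    (hno : ∀ j, pvMatch seq pat j = false) : pvOcc seq pat = [] := by
  rw [List.eq_nil_iff_forall_not_mem]
  intro x hx
  obtain ⟨j, rfl, hm⟩ := (pvOcc_mem hp x).mp hx
  rw [hno j] at hm; simp at hm

-- pointer-advance: result characterization
lemma pvAdv_spec (L : List Int) (s : Int) (p : Nat) (hple : p ≤ L.length)
    (hbefore : ∀ j, j < p → L.getD j 0 < s) :
    p ≤ pvAdv L s p ∧ pvAdv L s p ≤ L.length ∧
      (∀ j, j < pvAdv L s p → L.getD j 0 < s) ∧
      (pvAdv L s p < L.length → s ≤ L.getD (pvAdv L s p) 0) := by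
  induction hk : L.length - p generalizing p with
  | zero =>
    have : p = L.length := by omega
    rw [pvAdv, if_neg (by omega)]
    exact ⟨le_refl _, by omega, hbefore, by omega⟩
  | succ k ih =>
    have hplt : p < L.length := by omega
    rw [pvAdv, if_pos hplt]
    by_cases hlt : L.getD p 0 < s
    · rw [if_pos hlt]
      have := ih (p+1) (by omega)
        (fun j hj => by rcases Nat.lt_or_ge j p with h | h; exacts [hbefore j h, by rw [show j = p from by omega]; exact hlt])
        (by omega)
      exact ⟨by omega, this.2.1, this.2.2.1, this.2.2.2⟩
    · rw [if_neg hlt]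
      exact ⟨le_refl _, by omega, hbefore, fun _ => by omega⟩

-- bridge: pointer advance over an occurrence list computes pvFirstM
lemma pvAdv_firstM {ids pat : List Int} (hp : pat ≠ []) (s : Nat) (p : Nat)
    (hple : p ≤ (pvOcc ids pat).length)
    (hbefore : ∀ j, j < p → (pvOcc ids pat).getD j 0 < (s:Int)) :
    (pvAdv (pvOcc ids pat) (s:Int) p = (pvOcc ids pat).length ∧ pvFirstM ids pat s = none) ∨
    (pvAdv (pvOcc ids pat) (s:Int) p < (pvOcc ids pat).length ∧
      ∃ h : Nat, pvFirstM ids pat s = some h ∧ (pvOcc ids pat).getD (pvAdv (pvOcc ids pat) (s:Int) p) 0 = (h:Int)) := by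
  set L := pvOcc ids pat with hLdef
  obtain ⟨h1, h2, h3, h4⟩ := pvAdv_spec L (s:Int) p hple hbefore
  set q := pvAdv L (s:Int) p with hq
  have hsorted := pvOcc_sorted ids pat
  rw [← hLdef] at hsorted
  have hgetlt : ∀ i j : Nat, i < j → j < L.length → L.getD i 0 < L.getD j 0 := by
    intro i j hij hj
    rw [List.getD_eq_getElem _ _ (by omega), List.getD_eq_getElem _ _ hj]
    exact (List.pairwise_iff_getElem.mp hsorted) i j (by omega) hj hij
  rcases Nat.lt_or_ge q L.length with hqlt | hqge
  · right
    refine ⟨hqlt, ?_⟩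
    have hmemq : L.getD q 0 ∈ L := by
      rw [List.getD_eq_getElem _ _ hqlt]; exact List.getElem_mem _
    obtain ⟨h0, hh0, hm0⟩ := (pvOcc_mem hp _).mp hmemq
    have hsle : s ≤ h0 := by have := h4 hqlt; omega
    refine ⟨h0, pvFirstM_eq_some hp hm0 hsle ?_, hh0⟩
    intro j hsj hjh
    by_contra hc
    have hmj : pvMatch ids pat j = true := by simpa using hc
    have hmemj : ((j:Nat):Int) ∈ L := (pvOcc_mem hp _).mpr ⟨j, rfl, hmj⟩
    obtain ⟨i, hi, hieq⟩ := List.getElem_of_mem hmemj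
    have hieq' : L.getD i 0 = (j:Int) := by rw [List.getD_eq_getElem _ _ hi, hieq]
    rcases Nat.lt_or_ge i q with hiq | hiq
    · have := h3 i hiq; rw [hieq'] at this; omega
    · rcases Nat.eq_or_lt_of_le hiq with heq | hlt
      · have : (j:Int) = (h0:Int) := by rw [← hieq', ← heq]; exact hh0
        omega
      · have := hgetlt q i hlt hi
        rw [hieq', hh0] at this
        omega
  · left
    refine ⟨by omega, pvFirstM_eq_none ?_⟩
    intro j hsj
    by_contra hc
    have hmj : pvMatch ids pat j = true := by simpa using hc
    have hmemj : ((j:Nat):Int) ∈ L := (pvOcc_mem hp _).mpr ⟨j, rfl, hmj⟩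
    obtain ⟨i, hi, hieq⟩ := List.getElem_of_mem hmemj
    have hieq' : L.getD i 0 = (j:Int) := by rw [List.getD_eq_getElem _ _ hi, hieq]
    have := h3 i (by omega)
    rw [hieq'] at this
    omega

lemma pvALoop_at_end (ids H E : List Int) (ml pad : Int) :
    ∀ fa lab, pvALoop ids H E ml pad fa (ids.length : Int) lab = lab := by
  intro fa lab
  cases fa with
  | zero => rfl
  | succ fa => rw [pvALoop, if_neg (lt_irrefl _)]

lemma pvBMain_at_end (ids H E : List Int) (ml pad : Int) (headers eoses : List Int) :
    ∀ fb hp ep lab, pvBMain ids H E ml pad headers eoses fb (ids.length : Int) hp ep lab = lab := by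
  intro fb hp ep lab
  cases fb with
  | zero => rfl
  | succ fb => rw [pvBMain, if_neg (lt_irrefl _)]

-- matches past the end of the list are impossible for a non-empty pattern
lemma pvMatch_past {ids pat : List Int} {j : Nat} (hp : pat ≠ []) (hj : ids.length ≤ j) :
    pvMatch ids pat j = false := by
  by_contra hc
  have hm : pvMatch ids pat j = true := by simpa using hc
  have := pvMatch_bound hm hp
  have := List.length_pos_of_ne_nil hp
  omega

-- the main lockstep simulation, under the no-trap clause of Pre_
lemma pvMain (ids H E : List Int) (ml pad : Int)
    (_hml : 0 ≤ ml)
    (hne : H ≠ [] ∨ E ≠ [])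
    (htrap : ∀ h : Nat, h ≤ ids.length → ml ≤ (h:Int) → pvMatch ids H h = true →
      ∀ e : Nat, e ≤ ids.length → h + H.length ≤ e → pvMatch ids E e = true → False) :
    ∀ fuel : Nat, ∀ i : Nat, i ≤ ids.length → ids.length - i < fuel →
    ∀ hp ep lab,
      hp ≤ (pvOcc ids H).length → (∀ j, j < hp → (pvOcc ids H).getD j 0 < (i:Int)) →
      ep ≤ (pvOcc ids E).length → (∀ j, j < ep → (pvOcc ids E).getD j 0 < (i:Int) + (H.length:Int)) →
      pvALoop ids H E ml pad fuel (i:Int) lab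
        = pvBMain ids H E ml pad (pvOcc ids H) (pvOcc ids E) fuel (i:Int) hp ep lab := by
  intro fuel
  induction fuel with
  | zero => intro i _ h2; omega
  | succ fuel ih =>
    intro i hile hfuel hp ep lab hhple hhinv heple heinv
    by_cases hiend : i = ids.length
    · subst hiend; rw [pvALoop_at_end, pvBMain_at_end]
    have hin : i < ids.length := by omega
    have hinZ : (i:Int) < (ids.length : Int) := by exact_mod_cast hin
    rw [pvALoop, pvBMain, if_pos hinZ, if_pos hinZ]
    by_cases hH : H = []
    · -- header pattern empty: header "found" at the current index on both sides
      have hE : E ≠ [] := hne.resolve_left (not_not_intro hH)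
      subst hH
      rw [pvFindSub_nil, if_neg (show ¬((i:Int) < 0) by omega), if_pos rfl]
      simp only [List.length_nil, Nat.cast_zero, add_zero]
      obtain ⟨a1, a2, a3, a4⟩ := pvAdv_spec (pvOcc ids E) (i:Int) ep heple
        (fun j hj => by have := heinv j hj; simpa using this)
      rcases pvAdv_firstM hE i ep heple
          (fun j hj => by have := heinv j hj; simpa using this) with
        ⟨hq, hfm⟩ | ⟨hq, e0, hfm, hget⟩
      · -- no eos at or after i: both label to the end and stop
        rw [pvFindSub_eq ids E hE i, hfm, if_neg hE, if_pos hq]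
        simp only [show ((-1:Int) < 0) = True from by simp, if_true, min_self,
          show ((-1:Int) ≥ 0) = False from by simp, if_false,
          show (((ids.length:Int)) ≥ 0) = True from by simp, if_true]
        rw [pvALoop_at_end, pvBMain_at_end]
      · -- eos found at e0 on both sides
        rw [pvFindSub_eq ids E hE i, hfm, if_neg hE, if_neg (Nat.ne_of_lt hq), hget]
        simp only []
        obtain ⟨hie, hen, hme, _⟩ := pvFirstM_some hfm
        have hbound : e0 + E.length ≤ ids.length := pvMatch_bound hme hE
        have hEL : 0 < E.length := List.length_pos_of_ne_nil hE
        have hmlgt : (i:Int) < ml := by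
          by_contra hc
          exact htrap i (by omega) (by omega) (pvMatch_empty ids i) e0 (by omega) (by simpa using hie) hme
        set boundary : Int := min ((e0:Int) + (E.length:Int)) ml with hbdef
        have hb1 : (i:Int) < boundary := by
          rw [hbdef]; apply lt_min (by omega) hmlgt
        have hb2 : boundary ≤ (ids.length:Int) := by
          rw [hbdef]
          exact le_trans (min_le_left _ _) (by omega)
        obtain ⟨i', hi'⟩ : ∃ i' : Nat, (i':Int) = boundary := ⟨boundary.toNat, by omega⟩
        rw [← hi']
        exact ih i' (by omega) (by omega) hp (pvAdv (pvOcc ids E) (i:Int) ep) _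
          hhple (fun j hj => lt_of_lt_of_le (hhinv j hj) (by omega))
          a2 (fun j hj => by have := a3 j hj; simpa using lt_of_lt_of_le this (by omega))
    · -- header pattern non-empty: both sides look for the next header occurrence
      obtain ⟨a1, a2, a3, a4⟩ := pvAdv_spec (pvOcc ids H) (i:Int) hp hhple hhinv
      rcases pvAdv_firstM hH i hp hhple hhinv with ⟨hq, hfm⟩ | ⟨hq, h0, hfm, hget⟩
      · -- no header: A breaks, B breaks
        rw [pvFindSub_eq ids H hH i, hfm, if_pos (by norm_num : (-1:Int) < 0),
            if_neg hH, if_pos hq]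
      · -- header found at h0
        rw [pvFindSub_eq ids H hH i, hfm, if_neg (show ¬((h0:Int) < 0) by omega),
            if_neg hH, if_neg (Nat.ne_of_lt hq), hget]
        simp only []
        obtain ⟨hih0, hh0n, hmh, _⟩ := pvFirstM_some hfm
        have hHL : 0 < H.length := List.length_pos_of_ne_nil hH
        have hhb : h0 + H.length ≤ ids.length := pvMatch_bound hmh hH
        have hcast : (h0:Int) + (H.length:Int) = ((h0 + H.length : Nat):Int) := by push_cast; ring
        rw [hcast]
        by_cases hEe : E = []
        · -- eos pattern empty: found at start on both sides
          subst hEe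
          simp only []
          rw [pvFindSub_nil]
          simp only [if_true, List.length_nil, Nat.cast_zero, add_zero]
          have hmlgt : (h0:Int) < ml := by
            by_contra hc
            exact htrap h0 (by omega) (by omega) hmh (h0 + H.length) (by omega) (by omega)
              (pvMatch_empty ids _)
          set boundary : Int := min (((h0 + H.length : Nat):Int)) ml with hbdef
          have hb1 : (i:Int) < boundary := by
            rw [hbdef]; apply lt_min (by push_cast; omega) (by omega)
          have hb1' : (h0:Int) < boundary := by
            rw [hbdef]; apply lt_min (by push_cast; omega) hmlgt
          have hb2 : boundary ≤ (ids.length:Int) := by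
            rw [hbdef]
            exact le_trans (min_le_left _ _) (by push_cast; omega)
          obtain ⟨i', hi'⟩ : ∃ i' : Nat, (i':Int) = boundary := ⟨boundary.toNat, by omega⟩
          rw [← hi']
          exact ih i' (by omega) (by omega) (pvAdv (pvOcc ids H) (i:Int) hp) ep _
            a2 (fun j hj => by have := a3 j hj; exact lt_of_lt_of_le this (by omega))
            heple (fun j hj => lt_of_lt_of_le (heinv j hj) (by omega))
        · -- eos pattern non-empty
          obtain ⟨b1, b2, b3, b4⟩ := pvAdv_spec (pvOcc ids E) (((h0 + H.length : Nat):Int)) ep heple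
            (fun j hj => lt_of_lt_of_le (heinv j hj) (by push_cast; omega))
          rcases pvAdv_firstM hEe (h0 + H.length) ep heple
              (fun j hj => lt_of_lt_of_le (heinv j hj) (by push_cast; omega)) with
            ⟨hq2, hfm2⟩ | ⟨hq2, e0, hfm2, hget2⟩
          · -- no eos after the header: both label to the end and stop
            rw [pvFindSub_eq ids E hEe (h0 + H.length), hfm2, if_neg hEe, if_pos hq2]
            simp only [show ((-1:Int) < 0) = True from by simp, if_true, min_self,
          show ((-1:Int) ≥ 0) = False from by simp, if_false,
          show (((ids.length:Int)) ≥ 0) = True from by simp, if_true]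
            rw [pvALoop_at_end, pvBMain_at_end]
          · -- eos found at e0
            rw [pvFindSub_eq ids E hEe (h0 + H.length), hfm2, if_neg hEe, if_neg (Nat.ne_of_lt hq2), hget2]
            simp only []
            obtain ⟨hse, hen, hme, _⟩ := pvFirstM_some hfm2
            have hbound : e0 + E.length ≤ ids.length := pvMatch_bound hme hEe
            have hEL : 0 < E.length := List.length_pos_of_ne_nil hEe
            have hmlgt : (h0:Int) < ml := by
              by_contra hc
              exact htrap h0 (by omega) (by omega) hmh e0 (by omega) (by omega) hme
            set boundary : Int := min ((e0:Int) + (E.length:Int)) ml with hbdef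
            have hb1 : (i:Int) < boundary := by
              rw [hbdef]; apply lt_min (by omega) (by omega)
            have hb1' : (h0:Int) < boundary := by
              rw [hbdef]; apply lt_min (by omega) hmlgt
            have hb2 : boundary ≤ (ids.length:Int) := by
              rw [hbdef]
              exact le_trans (min_le_left _ _) (by omega)
            obtain ⟨i', hi'⟩ : ∃ i' : Nat, (i':Int) = boundary := ⟨boundary.toNat, by omega⟩
            rw [← hi']
            exact ih i' (by omega) (by omega) (pvAdv (pvOcc ids H) (i:Int) hp)
              (pvAdv (pvOcc ids E) (((h0 + H.length : Nat):Int)) ep) _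
              a2 (fun j hj => by have := a3 j hj; exact lt_of_lt_of_le this (by omega))
              b2 (fun j hj => by have := b3 j hj; exact lt_of_lt_of_le this (by push_cast; omega))

-- a header pattern that never occurs: both sides return the untouched labels
lemma pvNoHeader (ids H E : List Int) (ml pad : Int) (hH : H ≠ [])
    (hno : ∀ j, pvMatch ids H j = false) (fuel : Nat) (i : Nat) (ep : Nat) (lab : List Int) :
    pvALoop ids H E ml pad fuel (i:Int) lab = lab ∧
      pvBMain ids H E ml pad (pvOcc ids H) (pvOcc ids E) fuel (i:Int) 0 ep lab = lab := by
  cases fuel with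
  | zero => exact ⟨rfl, rfl⟩
  | succ fuel =>
    by_cases hin : (i:Int) < (ids.length:Int)
    · rw [pvALoop, pvBMain, if_pos hin, if_pos hin]
      constructor
      · rw [pvFindSub_eq ids H hH i, pvFirstM_eq_none (fun j _ => hno j),
          if_pos (by norm_num : (-1:Int) < 0)]
      · rw [if_neg hH, pvOcc_nil hH hno]
        simp [pvAdv]
    · rw [pvALoop, pvBMain, if_neg hin, if_neg hin]
      exact ⟨rfl, rfl⟩

-- an eos pattern that never occurs: any found span runs to the end and both sides stop
lemma pvNoEos (ids H E : List Int) (ml pad : Int) (hH : H ≠ []) (hE : E ≠ [])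
    (hnoE : ∀ j, pvMatch ids E j = false) (fuel : Nat) (i : Nat) (hp : Nat) (lab : List Int)
    (hhple : hp ≤ (pvOcc ids H).length) (hhinv : ∀ j, j < hp → (pvOcc ids H).getD j 0 < (i:Int)) :
    pvALoop ids H E ml pad (fuel+1) (i:Int) lab
      = pvBMain ids H E ml pad (pvOcc ids H) (pvOcc ids E) (fuel+1) (i:Int) hp 0 lab := by
  by_cases hin : (i:Int) < (ids.length:Int)
  · rw [pvALoop, pvBMain, if_pos hin, if_pos hin]
    rcases pvAdv_firstM hH i hp hhple hhinv with ⟨hq, hfm⟩ | ⟨hq, h0, hfm, hget⟩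
    · rw [pvFindSub_eq ids H hH i, hfm, if_pos (by norm_num : (-1:Int) < 0), if_neg hH, if_pos hq]
    · rw [pvFindSub_eq ids H hH i, hfm, if_neg (show ¬((h0:Int) < 0) by omega),
          if_neg hH, if_neg (Nat.ne_of_lt hq), hget]
      simp only []
      have hcast : (h0:Int) + (H.length:Int) = ((h0 + H.length : Nat):Int) := by push_cast; ring
      rw [hcast, pvFindSub_eq ids E hE (h0 + H.length), pvFirstM_eq_none (fun j _ => hnoE j),
        pvOcc_nil hE hnoE]
      rw [show pvAdv [] (((h0 + H.length : Nat)):Int) 0 = 0 from by rw [pvAdv]; simp]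
      simp only [List.length_nil, if_neg hE,
        show ((-1:Int) < 0) = True from by simp, if_true, min_self,
        show ((-1:Int) ≥ 0) = False from by simp, if_false,
        show (((ids.length:Int)) ≥ 0) = True from by simp, if_true]
      rw [pvALoop_at_end, pvBMain_at_end]
  · rw [pvALoop, pvBMain, if_neg hin, if_neg hin]

-- matches everywhere-false from the bounded form in Pre_
lemma pvNoMatchAll {ids pat : List Int} (hp : pat ≠ [])
    (hno : ∀ j ∈ List.range (ids.length + 1), pvMatch ids pat j = false) :
    ∀ j, pvMatch ids pat j = false := by
  intro j
  rcases Nat.lt_or_ge j (ids.length + 1) with hj | hj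
  · exact hno j (List.mem_range.mpr hj)
  · exact pvMatch_past hp (by omega)

-- ===== VERDICT (by name: the statement is the Claim_ definition above) =====
theorem build_loss_labels_spec : Claim_equal_build_loss_labels := by
  intro ids tok ml H E pad _hdom hpre
  unfold Spec_build_loss_labels build_loss_labels build_loss_labels_alt
  rcases hpre with hnil | ⟨hH, hnoH⟩ | ⟨hH, hE, hnoE⟩ | ⟨hml, hne, htrap⟩
  · -- empty input: both loops exit immediately
    subst hnil
    exact (pvALoop_at_end [] H E ml pad _ _).trans (pvBMain_at_end [] H E ml pad _ _ _ _ _ _).symm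
  · -- the header pattern never occurs: both sides break at once
    have hno := pvNoMatchAll hH hnoH
    have := pvNoHeader ids H E ml pad hH hno (ids.length + 1) 0 0 (List.replicate ids.length (-100))
    rw [show ((0:Nat):Int) = (0:Int) from rfl] at this
    exact this.1.trans this.2.symm
  · -- the eos pattern never occurs: a found span runs to the end, then both stop
    have hnoE' := pvNoMatchAll hE hnoE
    have h00 : ((0:Nat):Int) = (0:Int) := rfl
    cases hfm : pvFirstM ids H 0 with
    | none =>
      have hno : ∀ j, pvMatch ids H j = false := by
        intro j
        rcases Nat.lt_or_ge j ids.length with hj | hj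
        · exact pvFirstM_none hfm hH j (by omega)
        · exact pvMatch_past hH hj
      have := pvNoHeader ids H E ml pad hH hno (ids.length + 1) 0 0 (List.replicate ids.length (-100))
      rw [h00] at this
      exact this.1.trans this.2.symm
    | some h0 =>
      obtain ⟨_, hh0n, _, _⟩ := pvFirstM_some hfm
      obtain ⟨f, hf⟩ : ∃ f, ids.length + 1 = f + 1 := ⟨ids.length, rfl⟩
      rw [hf]
      have := pvNoEos ids H E ml pad hH hE hnoE' f 0 0 (List.replicate ids.length (-100))
        (Nat.zero_le _) (by omega)
      simpa using this
  · -- the general no-trap case: lockstep simulation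
    have htrap' : ∀ h : Nat, h ≤ ids.length → ml ≤ (h:Int) → pvMatch ids H h = true →
        ∀ e : Nat, e ≤ ids.length → h + H.length ≤ e → pvMatch ids E e = true → False := by
      intro h hh hml2 hmh e he hhe hme
      exact htrap h (List.mem_range.mpr (by omega)) hml2 hmh e (List.mem_range.mpr (by omega)) hhe hme
    have := pvMain ids H E ml pad hml hne htrap' (ids.length + 1) 0 (Nat.zero_le _) (by omega)
      0 0 (List.replicate ids.length (-100)) (Nat.zero_le _) (by omega) (Nat.zero_le _) (by omega)
    simpa using this
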